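-- pv_equiv track=rewrite | github.com/dpak-maurya/rag-deep-dive | data/test.py | _chars_to_lines
-- ===== SOURCE A (Python) =====
-- from typing import List, Dict, Optional, Tuple
--
-- def _chars_to_lines(offsets: List[int], char_start: int, char_end: int) -> Tuple[int, int]:
--     """
--     Convert char offsets to approximate (start_line, end_line) 0-based indices.
--     Returns 1-based line numbers to be human-friendly.
--     """
--     # find last offset <= char_start
--     start_line = 1
--     end_line = 1
--     for i, off in enumerate(offsets):
--         if off <= char_start:
--             start_line = i + 1
--         if off <= char_end:
--             end_line = i + 1
--     return start_line, end_line
-- ===== SOURCE B (Python) =====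
-- def _chars_to_lines(offsets, char_start, char_end):
--     """Backward scan with early exit: the answer is 1 + the last index whose
--     offset is <= the bound, so scan from the end and stop at the first hit."""
--     def last_le(bound):
--         for i in range(len(offsets) - 1, -1, -1):
--             if offsets[i] <= bound:
--                 return i + 1
--         return 1
--     return last_le(char_start), last_le(char_end)
-- ===== Notes on version B (the rewrite author's own statement) =====
-- stated objective: alternative
-- what changed: Replaces the single forward pass that keeps updating two accumulators with two backward scans that each stop at the first (i.e. last) offset <= the bound, exiting early.
import Mathlib
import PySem

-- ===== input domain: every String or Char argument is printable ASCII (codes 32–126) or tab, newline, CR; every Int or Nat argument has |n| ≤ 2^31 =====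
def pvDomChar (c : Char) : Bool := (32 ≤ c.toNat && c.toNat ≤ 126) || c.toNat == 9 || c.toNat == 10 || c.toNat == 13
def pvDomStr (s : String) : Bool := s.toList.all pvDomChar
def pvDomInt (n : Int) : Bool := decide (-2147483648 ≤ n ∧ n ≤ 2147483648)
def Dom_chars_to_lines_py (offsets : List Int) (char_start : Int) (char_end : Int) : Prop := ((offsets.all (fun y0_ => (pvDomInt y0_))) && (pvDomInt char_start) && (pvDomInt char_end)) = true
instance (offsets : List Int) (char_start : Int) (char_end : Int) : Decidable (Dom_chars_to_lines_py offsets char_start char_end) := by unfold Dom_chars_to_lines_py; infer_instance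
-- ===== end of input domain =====

-- B replaces A's single forward pass with two early-exiting backward scans (objective: alternative).

-- ===== PORT A =====
-- forward pass over enumerate(offsets), updating both accumulators
def chars_to_lines_py (offsets : List Int) (char_start : Int) (char_end : Int) : Int × Int :=
  (PySem.List.enumerate offsets 0).foldl
    (fun acc p =>
      let acc1 := if p.2 ≤ char_start then p.1 + 1 else acc.1
      let acc2 := if p.2 ≤ char_end then p.1 + 1 else acc.2
      (acc1, acc2))
    (1, 1)

-- ===== PORT B =====
-- backward scan: first index i from the back (i = len-1 … 0) with offsets[i] ≤ bound
def lastLe (offsets : List Int) (bound : Int) : Nat → Int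
  | 0 => 1
  | i + 1 => if offsets.getD i 0 ≤ bound then (i : Int) + 1 else lastLe offsets bound i

def chars_to_lines_py_alt (offsets : List Int) (char_start : Int) (char_end : Int) : Int × Int :=
  (lastLe offsets char_start offsets.length, lastLe offsets char_end offsets.length)

-- ===== PRECONDITION & SPEC =====
def Spec_chars_to_lines_py (offsets : List Int) (char_start : Int) (char_end : Int) (out : Int × Int) : Prop := out = chars_to_lines_py_alt offsets char_start char_end
instance (offsets : List Int) (char_start : Int) (char_end : Int) (out : Int × Int) : Decidable (Spec_chars_to_lines_py offsets char_start char_end out) := by unfold Spec_chars_to_lines_py; infer_instance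

-- ===== CLAIM (what is proved, stated in full; the proofs are below) =====
def Claim_equal_chars_to_lines_py : Prop := ∀ (offsets : List Int) (char_start : Int) (char_end : Int), Dom_chars_to_lines_py offsets char_start char_end → Spec_chars_to_lines_py offsets char_start char_end (chars_to_lines_py offsets char_start char_end)

-- ===== LEMMAS AND PROOFS =====

-- single-accumulator version of A's fold (one component)
def foldA (offsets : List Int) (b : Int) : Int :=
  (PySem.List.enumerate offsets 0).foldl (fun acc p => if p.2 ≤ b then p.1 + 1 else acc) 1

-- A's paired fold is the pair of the two single folds
theorem foldl_pair (l : List (Int × Int)) (b1 b2 : Int) (s e : Int) :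
    l.foldl (fun acc p =>
      let acc1 := if p.2 ≤ b1 then p.1 + 1 else acc.1
      let acc2 := if p.2 ≤ b2 then p.1 + 1 else acc.2
      ((acc1, acc2) : Int × Int)) (s, e)
    = (l.foldl (fun acc p => if p.2 ≤ b1 then p.1 + 1 else acc) s,
       l.foldl (fun acc p => if p.2 ≤ b2 then p.1 + 1 else acc) e) := by
  induction l generalizing s e with
  | nil => rfl
  | cons x xs ih => simp [List.foldl, ih]

-- lastLe ignores elements at positions ≥ the cut-off index
theorem lastLe_append (xs : List Int) (x b : Int) (i : Nat) (h : i ≤ xs.length) :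
    lastLe (xs ++ [x]) b i = lastLe xs b i := by
  induction i with
  | zero => rfl
  | succ j ih =>
    have hj : j < xs.length := by omega
    simp [lastLe, List.getElem?_append_left hj, ih (by omega)]

-- the forward single fold equals the backward scan
theorem foldA_eq_lastLe (xs : List Int) (b : Int) :
    foldA xs b = lastLe xs b xs.length := by
  induction xs using List.reverseRecOn with
  | nil => rfl
  | append_singleton ys x ih =>
    have hlen : (ys ++ [x]).length = ys.length + 1 := by simp
    have hget : (ys ++ [x]).getD ys.length 0 = x := by
      simp [List.getD]
    unfold foldA at ih ⊢
    rw [PySem.List.enumerate_append, List.foldl_append]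
    simp only [PySem.List.enumerate, List.foldl]
    rw [hlen]
    simp only [lastLe, hget]
    rw [lastLe_append ys x b ys.length (le_refl _), ← ih]
    norm_num

-- ===== VERDICT (by name: the statement is the Claim_ definition above) =====
theorem chars_to_lines_py_spec : Claim_equal_chars_to_lines_py := by
  intro offsets cs ce _
  show chars_to_lines_py offsets cs ce = chars_to_lines_py_alt offsets cs ce
  unfold chars_to_lines_py chars_to_lines_py_alt
  rw [foldl_pair, ← foldA_eq_lastLe, ← foldA_eq_lastLe]
  rfl
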